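-- pv_equiv track=rewrite | github.com/cma029/APN-Repository | computations/poly_parse_utils.py | bitmask_to_poly_str
-- ===== SOURCE A (Python) =====
-- def bitmask_to_poly_str(poly_int: int) -> str:
--     # Convert an integer bitmask to polynomial string, e.g. 0x5B => 'x^6 + x^4 + x^3 + x + 1'.
--     if poly_int == 0:
--         return "0"
--     bits = []
--     highest_power = poly_int.bit_length() - 1
--     for exp in range(highest_power, -1, -1):
--         if (poly_int >> exp) & 1:
--             if exp == 0:
--                 bits.append("1")
--             elif exp == 1:
--                 bits.append("x")
--             else:
--                 bits.append(f"x^{exp}")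
--     return " + ".join(bits)
-- ===== SOURCE B (Python) =====
-- def bitmask_to_poly_str(poly_int: int) -> str:
--     # Extract set bits highest-first instead of scanning every exponent.
--     if poly_int == 0:
--         return "0"
--     terms = []
--     n = poly_int
--     while n:
--         exp = n.bit_length() - 1
--         if exp == 0:
--             terms.append("1")
--         elif exp == 1:
--             terms.append("x")
--         else:
--             terms.append(f"x^{exp}")
--         n -= 1 << exp
--     return " + ".join(terms)
-- ===== Notes on version B (the rewrite author's own statement) =====
-- stated objective: alternative
-- what changed: B replaces A's filter-scan over every exponent from bit_length-1 down to 0 by a loop that strips the highest set bit each iteration (exp = n.bit_length()-1; n -= 1 << exp), so only the set bits are visited and no per-position bit test or range pass remains.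
-- outside the precondition, e.g. on bitmask_to_poly_str(-5): A returns 'x + 1', B does not finish within the time limit; on bitmask_to_poly_str(-1): A returns '1', B does not finish within the time limit
import Mathlib
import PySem

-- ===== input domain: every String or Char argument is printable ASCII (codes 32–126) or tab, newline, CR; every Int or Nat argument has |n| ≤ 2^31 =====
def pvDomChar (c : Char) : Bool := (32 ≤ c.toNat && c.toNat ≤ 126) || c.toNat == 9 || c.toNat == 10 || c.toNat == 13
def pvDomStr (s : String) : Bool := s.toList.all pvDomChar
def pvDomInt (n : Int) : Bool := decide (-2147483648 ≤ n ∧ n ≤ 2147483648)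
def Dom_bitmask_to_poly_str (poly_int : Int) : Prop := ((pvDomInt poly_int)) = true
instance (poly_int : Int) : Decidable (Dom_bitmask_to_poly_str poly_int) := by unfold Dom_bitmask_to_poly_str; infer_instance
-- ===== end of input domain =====

-- B replaces A's scan over every exponent from bit_length-1 down to 0 by a loop that
-- strips the highest set bit each round (exp = n.bit_length()-1; n -= 1 << exp), so
-- only set bits are visited and no range/filter pass exists; same term formatting.

-- ===== PORT A =====
-- exp drawn from range(highest_power, -1, -1) is always ≥ 0, so exp.toNat is exact for the shift.
def bitmask_to_poly_str (poly_int : Int) : String :=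
  if poly_int = 0 then "0"
  else
    let highest_power : Int := (PySem.Int.bitLength poly_int : Int) - 1
    let bits : List String :=
      (PySem.List.pyRange highest_power (-1) (-1)).foldl
        (fun acc exp =>
          if PySem.Int.band (poly_int >>> exp.toNat) 1 != 0 then
            acc ++ [if exp = 0 then "1" else if exp = 1 then "x"
                    else "x^" ++ PySem.Int.toStr exp]
          else acc) []
    PySem.Str.join " + " bits

-- ===== PORT B =====
-- B's while-loop over the nonnegative n, ported as structural recursion on Nat
-- (exact on the inputs Pre_ admits: there n is and stays a nonnegative integer).
def pvAltLoop (n : Nat) (terms : List String) : List String :=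
  if hn : n = 0 then terms
  else
    let exp : Nat := PySem.Int.bitLength (n : Int) - 1
    pvAltLoop (n - 1 <<< exp)
      (terms ++ [if exp = 0 then "1" else if exp = 1 then "x"
                 else "x^" ++ PySem.Int.toStr (exp : Int)])
termination_by n
decreasing_by
  have h1 : 2 ^ (PySem.Int.bitLength (n : Int) - 1) ≤ ((n : Int)).natAbs :=
    PySem.Int.two_pow_bitLength_le _ (by exact_mod_cast hn)
  simp only [Nat.one_shiftLeft] at *
  simp only [Int.natAbs_natCast] at h1
  have h2 : 0 < 2 ^ (PySem.Int.bitLength (n : Int) - 1) := Nat.two_pow_pos _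
  omega

def bitmask_to_poly_str_alt (poly_int : Int) : String :=
  if poly_int = 0 then "0"
  else PySem.Str.join " + " (pvAltLoop poly_int.toNat [])

-- ===== PRECONDITION & SPEC =====
-- Pre_ excludes negative bitmasks, on which B's subtract-the-top-bit loop never
-- terminates (A returns e.g. 'x + 1' for -5, reading it through two's complement).
def Pre_bitmask_to_poly_str (poly_int : Int) : Prop := 0 ≤ poly_int
instance (poly_int : Int) : Decidable (Pre_bitmask_to_poly_str poly_int) := by
  unfold Pre_bitmask_to_poly_str; infer_instance
def pvWitness_bitmask_to_poly_str : Int := (91)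

def Spec_bitmask_to_poly_str (poly_int : Int) (out : String) : Prop := out = bitmask_to_poly_str_alt poly_int
instance (poly_int : Int) (out : String) : Decidable (Spec_bitmask_to_poly_str poly_int out) := by unfold Spec_bitmask_to_poly_str; infer_instance

-- ===== CLAIM (what is proved, stated in full; the proofs are below) =====
def Claim_equal_bitmask_to_poly_str : Prop := ∀ (poly_int : Int), Dom_bitmask_to_poly_str poly_int → Pre_bitmask_to_poly_str poly_int → Spec_bitmask_to_poly_str poly_int (bitmask_to_poly_str poly_int)

-- ===== LEMMAS AND PROOFS =====

-- proof-side helpers: the shared term formatter and the descending list of set-bit exponents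
def pvTerm (e : Nat) : String :=
  if e = 0 then "1" else if e = 1 then "x" else "x^" ++ PySem.Int.toStr (e : Int)

def pvDExps (N : Nat) : List Nat :=
  ((List.range (PySem.Int.bitLength (N : Int))).filter N.testBit).reverse

lemma pv_lt (N : Nat) : N < 2 ^ PySem.Int.bitLength (N : Int) := by
  have := PySem.Int.lt_two_pow_bitLength (N : Int)
  simpa using this

lemma pv_le {N : Nat} (h : N ≠ 0) : 2 ^ (PySem.Int.bitLength (N : Int) - 1) ≤ N := by
  have := PySem.Int.two_pow_bitLength_le (N : Int) (by exact_mod_cast h)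
  simpa using this

lemma pv_bitLength_pos {N : Nat} (h : 0 < N) : 0 < PySem.Int.bitLength (N : Int) := by
  by_contra hc
  have h0 : PySem.Int.bitLength (N : Int) = 0 := by omega
  have := pv_lt N
  rw [h0] at this
  simp at this
  omega

lemma pv_bitLength_le_of_lt {N k : Nat} (h : N < 2 ^ k) : PySem.Int.bitLength (N : Int) ≤ k := by
  by_cases h0 : N = 0
  · subst h0; simp [PySem.Int.bitLength_zero]
  · by_contra hc
    have hk : k ≤ PySem.Int.bitLength (N : Int) - 1 := by omega
    have h1 := pv_le h0
    have h2 : (2:Nat) ^ k ≤ 2 ^ (PySem.Int.bitLength (N : Int) - 1) :=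
      Nat.pow_le_pow_right (by norm_num) hk
    omega

lemma pv_testBit_top {N : Nat} (h : 0 < N) :
    N.testBit (PySem.Int.bitLength (N : Int) - 1) = true := by
  set L := PySem.Int.bitLength (N : Int) with hL
  have hpos : 0 < L := pv_bitLength_pos h
  have h1 : 2 ^ (L - 1) ≤ N := pv_le (by omega)
  have h2 : N < 2 ^ L := hL ▸ pv_lt N
  rw [Nat.testBit_eq_decide_div_mod_eq]
  have hdiv : N / 2 ^ (L - 1) = 1 := by
    apply Nat.div_eq_of_lt_le (by simpa using h1)
    have : (2:Nat) ^ L = 2 ^ (L - 1) * 2 := by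
      rw [← pow_succ]; congr 1; omega
    omega
  simp [hdiv]

lemma pv_testBit_below {N i : Nat} (h : 0 < N)
    (hi : i < PySem.Int.bitLength (N : Int) - 1) :
    (N - 2 ^ (PySem.Int.bitLength (N : Int) - 1)).testBit i = N.testBit i := by
  set L := PySem.Int.bitLength (N : Int) with hL
  have h1 : 2 ^ (L - 1) ≤ N := pv_le (by omega)
  set r := N - 2 ^ (L - 1) with hr
  have hN : N = r + 2 ^ i * 2 ^ (L - 1 - i) := by
    have : (2:Nat) ^ i * 2 ^ (L - 1 - i) = 2 ^ (L - 1) := by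
      rw [← pow_add]; congr 1; omega
    omega
  rw [Nat.testBit_eq_decide_div_mod_eq, Nat.testBit_eq_decide_div_mod_eq]
  have hdiv : N / 2 ^ i = r / 2 ^ i + 2 ^ (L - 1 - i) := by
    rw [hN, Nat.add_mul_div_left _ _ (Nat.two_pow_pos i)]
  have heven : (2:Nat) ^ (L - 1 - i) = 2 ^ (L - 2 - i) * 2 := by
    rw [← pow_succ]; congr 1; omega
  rw [hdiv, heven, Nat.add_mul_mod_self_right]

lemma pv_filter_range_shrink (q : Nat → Bool) {a b : Nat} (hb : b ≤ a)
    (hf : ∀ i, b ≤ i → i < a → q i = false) :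
    (List.range a).filter q = (List.range b).filter q := by
  induction a with
  | zero => have : b = 0 := by omega
            subst this; rfl
  | succ a ih =>
    rcases Nat.eq_or_lt_of_le hb with rfl | hlt
    · rfl
    · rw [List.range_succ, List.filter_append]
      have : q a = false := hf a (by omega) (by omega)
      simp [this]
      exact ih (by omega) (fun i h1 h2 => hf i h1 (by omega))

lemma pv_dExps_pos {N : Nat} (h : 0 < N) :
    pvDExps N = (PySem.Int.bitLength (N : Int) - 1)
      :: pvDExps (N - 1 <<< (PySem.Int.bitLength (N : Int) - 1)) := by
  set L := PySem.Int.bitLength (N : Int) with hL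
  have hpos : 0 < L := pv_bitLength_pos h
  have h1 : 2 ^ (L - 1) ≤ N := pv_le (by omega)
  rw [Nat.one_shiftLeft]
  set r := N - 2 ^ (L - 1) with hr
  have hrlt : r < 2 ^ (L - 1) := by
    have h2 : N < 2 ^ L := hL ▸ pv_lt N
    have : (2:Nat) ^ L = 2 ^ (L - 1) * 2 := by rw [← pow_succ]; congr 1; omega
    omega
  have hL' : PySem.Int.bitLength (r : Int) ≤ L - 1 := pv_bitLength_le_of_lt hrlt
  unfold pvDExps
  rw [← hL]
  have hsplit : List.range L = List.range (L - 1) ++ [L - 1] := by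
    conv_lhs => rw [show L = (L - 1) + 1 by omega]
    exact List.range_succ
  rw [hsplit, List.filter_append]
  have htop : N.testBit (L - 1) = true := pv_testBit_top h
  have hmid : (List.range (L - 1)).filter N.testBit
      = (List.range (PySem.Int.bitLength (r : Int))).filter r.testBit := by
    have e1 : (List.range (L - 1)).filter N.testBit
        = (List.range (L - 1)).filter r.testBit :=
      List.filter_congr (fun i hi => (pv_testBit_below h (List.mem_range.mp hi)).symm)
    rw [e1]
    exact pv_filter_range_shrink r.testBit hL' (fun i hge _ => by
      apply Nat.testBit_lt_two_pow
      calc r < 2 ^ PySem.Int.bitLength (r : Int) := pv_lt r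
        _ ≤ 2 ^ i := Nat.pow_le_pow_right (by norm_num) hge)
  rw [hmid]
  simp [htop]

lemma pv_altLoop_eq (N : Nat) : ∀ ts, pvAltLoop N ts = ts ++ (pvDExps N).map pvTerm := by
  induction N using Nat.strong_induction_on with
  | _ N ih =>
    intro ts
    rw [pvAltLoop]
    by_cases h0 : N = 0
    · subst h0
      simp [pvDExps, PySem.Int.bitLength_zero]
    · have hpos : 0 < N := by omega
      rw [dif_neg h0]
      have hlt : N - 1 <<< (PySem.Int.bitLength (N : Int) - 1) < N := by
        rw [Nat.one_shiftLeft]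
        have := pv_le h0
        have := Nat.two_pow_pos (PySem.Int.bitLength (N : Int) - 1)
        omega
      rw [ih _ hlt, pv_dExps_pos hpos]
      simp [pvTerm]

lemma pv_reverse_range (L : Nat) :
    (List.range L).reverse = (List.range L).map (fun k => L - 1 - k) := by
  induction L with
  | zero => rfl
  | succ L ih =>
    conv_lhs => rw [List.range_succ]
    rw [List.reverse_append, ih, List.range_succ_eq_map]
    simp only [List.reverse_singleton, List.singleton_append, List.map_cons, List.map_map]
    congr 1
    all_goals first
    | omega
    | exact List.map_congr_left (fun a ha => by
        have := List.mem_range.mp ha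
        simp only [Function.comp]
        omega)

lemma pv_descmap (L : Nat) (q : Nat → Bool) (g : Nat → String) :
    ((List.range L).filter (fun k => q (L - 1 - k))).map (fun k => g (L - 1 - k))
      = (((List.range L).filter q).reverse).map g := by
  rw [← List.filter_reverse, pv_reverse_range, List.filter_map, List.map_map]
  rfl

lemma pv_A_bits {N : Nat} (h : 0 < N) :
    (PySem.List.pyRange ((PySem.Int.bitLength ((N : Int)) : Int) - 1) (-1) (-1)).foldl
      (fun acc exp =>
        if PySem.Int.band ((N : Int) >>> exp.toNat) 1 != 0 then
          acc ++ [if exp = 0 then "1" else if exp = 1 then "x"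
                  else "x^" ++ PySem.Int.toStr exp]
        else acc) []
    = (pvDExps N).map pvTerm := by
  set L := PySem.Int.bitLength (N : Int) with hL
  have hLpos : 0 < L := pv_bitLength_pos h
  rw [PySem.List.foldl_append_if
    (fun exp : Int => PySem.Int.band ((N : Int) >>> ((exp.toNat : Nat) : Int)) 1 != 0)
    (fun exp : Int => if exp = 0 then "1" else if exp = 1 then "x"
                      else "x^" ++ PySem.Int.toStr exp)]
  rw [List.nil_append, PySem.List.pyRange_neg_one]
  have harg : ((L : Int) - 1 - (-1)).toNat = L := by omega
  rw [harg, List.filter_map, List.map_map]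
  have hstep : ∀ k ∈ List.range L,
      ((fun exp : Int => PySem.Int.band ((N : Int) >>> ((exp.toNat : Nat) : Int)) 1 != 0) ∘
        (fun k : Nat => (L : Int) - 1 - (k : Int))) k = N.testBit (L - 1 - k) := by
    intro k hk
    rw [List.mem_range] at hk
    have htn : ((L : Int) - 1 - (k : Int)).toNat = L - 1 - k := by omega
    simp only [Function.comp]
    rw [htn, Int.shiftRight_natCast,
      show (1:Int) = ((1:Nat):Int) from rfl, PySem.Int.band_natCast,
      Nat.and_one_is_mod, Nat.shiftRight_eq_div_pow,
      Nat.testBit_eq_decide_div_mod_eq]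
    have : N / 2 ^ (L - 1 - k) % 2 = 0 ∨ N / 2 ^ (L - 1 - k) % 2 = 1 := by omega
    rcases this with h2 | h2 <;> simp [h2]
  rw [List.filter_congr hstep]
  have hmapf : ∀ a ∈ (List.range L).filter (fun k => N.testBit (L - 1 - k)),
      ((fun exp : Int => if exp = 0 then "1" else if exp = 1 then "x"
          else "x^" ++ PySem.Int.toStr exp) ∘
        (fun k : Nat => (L : Int) - 1 - (k : Int))) a
      = (fun k => pvTerm (L - 1 - k)) a := by
    intro a ha
    have hk : a < L := List.mem_range.mp (List.mem_filter.mp ha).1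
    have htn : ((L : Int) - 1 - (a : Int)) = ((L - 1 - a : Nat) : Int) := by omega
    simp only [Function.comp, htn, pvTerm]
    norm_cast
  rw [List.map_congr_left hmapf, pv_descmap L N.testBit pvTerm]
  rfl

-- ===== VERDICT (by name: the statement is the Claim_ definition above) =====
theorem bitmask_to_poly_str_spec : Claim_equal_bitmask_to_poly_str := by
  intro n _ hpre
  unfold Spec_bitmask_to_poly_str
  obtain ⟨N, rfl⟩ : ∃ N : Nat, n = (N : Int) := ⟨n.toNat, (Int.toNat_of_nonneg hpre).symm⟩
  by_cases h0 : N = 0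
  · subst h0; rfl
  · have hN : 0 < N := by omega
    have hne : ((N : Nat) : Int) ≠ 0 := by exact_mod_cast h0
    simp only [bitmask_to_poly_str, bitmask_to_poly_str_alt, if_neg hne, Int.toNat_natCast]
    rw [pv_altLoop_eq, List.nil_append, pv_A_bits hN]
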